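-- pv_equiv track=rewrite | github.com/JacopoBoccato/FaderNetworks | scripts/sample_EM.py | score_sequence
-- ===== SOURCE A (Python) =====
-- def score_sequence(seq):
--     """
--     Returns the charge-pattern score for a single sequence.
--     Positive at positions [0,24], negative at [1,15,17,19].
--     """
--     indices_pos = [0, 24]
--     indices_neg = [1, 15, 17, 19]
--     positive_letters = {'H', 'K', 'R'}
--     negative_letters = {'D', 'E'}
--
--     score = 0
--     seq = seq.upper()
--
--     for idx in indices_pos:
--         if 0 <= idx < len(seq):
--             if seq[idx] in positive_letters:
--                 score += 1
--             elif seq[idx] in negative_letters: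
--                 score -= 1
--
--     for idx in indices_neg:
--         if 0 <= idx < len(seq):
--             if seq[idx] in positive_letters:
--                 score -= 1
--             elif seq[idx] in negative_letters:
--                 score += 1
--
--     return score
-- ===== SOURCE B (Python) =====
-- # B: single left-to-right scan of the (truncated) sequence itself, with a
-- # 25-entry positional weight table and an arithmetic letter charge -- instead
-- # of A's two loops over fixed index lists with if/elif branches.
--
-- _WEIGHTS = (1, -1) + (0,) * 13 + (-1, 0, -1, 0, -1) + (0,) * 4 + (1,)
--
--
-- def score_sequence(seq):
--     score = 0
--     for i, c in enumerate(seq.upper()[:25]):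
--         score += _WEIGHTS[i] * ((c in 'HKR') - (c in 'DE'))
--     return score
-- ===== Notes on version B (the rewrite author's own statement) =====
-- stated objective: alternative
-- what changed: B scans the sequence itself once (enumerate over seq.upper()[:25]) and accumulates position-weight-times-letter-charge from a 25-entry weight table, instead of A's two loops over fixed index lists with bounds checks and if/elif set-membership branches.
import Mathlib
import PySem

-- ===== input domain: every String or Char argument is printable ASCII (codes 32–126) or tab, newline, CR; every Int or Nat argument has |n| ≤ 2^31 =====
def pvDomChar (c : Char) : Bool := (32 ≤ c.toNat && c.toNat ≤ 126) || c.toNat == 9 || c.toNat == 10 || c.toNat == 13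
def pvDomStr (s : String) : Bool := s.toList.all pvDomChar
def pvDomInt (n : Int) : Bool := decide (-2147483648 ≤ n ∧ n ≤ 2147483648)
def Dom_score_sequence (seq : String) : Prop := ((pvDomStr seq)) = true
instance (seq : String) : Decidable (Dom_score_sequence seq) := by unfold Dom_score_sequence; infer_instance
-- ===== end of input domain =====

-- B scans the sequence itself once (enumerate over the first 25 upper-cased characters) with a
-- 25-entry positional weight table and arithmetic letter charges, instead of A's two loops over
-- fixed index lists with bounds checks and if/elif set-membership branches (alternative decomposition).


-- ===== PORT A =====
def score_sequence (seq : String) : Int :=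
  let indices_pos : List Int := [0, 24]
  let indices_neg : List Int := [1, 15, 17, 19]
  let positive_letters : PySem.Set Char := PySem.Set.ofList ['H', 'K', 'R']
  let negative_letters : PySem.Set Char := PySem.Set.ofList ['D', 'E']
  let s := PySem.Str.upper seq
  let score : Int :=
    indices_pos.foldl (fun score idx =>
      if 0 ≤ idx ∧ idx < PySem.Str.len s then
        -- s[idx]: the guard puts idx in range, so the default of pyGetD is unreachable (exact)
        let ch := PySem.List.pyGetD s.toList idx ' '
        if positive_letters.contains ch then score + 1
        else if negative_letters.contains ch then score - 1
        else score
      else score) 0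
  indices_neg.foldl (fun score idx =>
    if 0 ≤ idx ∧ idx < PySem.Str.len s then
      let ch := PySem.List.pyGetD s.toList idx ' '
      if positive_letters.contains ch then score - 1
      else if negative_letters.contains ch then score + 1
      else score
    else score) score

-- ===== PORT B =====
-- B's module-level weight tuple (1,-1) + (0,)*13 + (-1,0,-1,0,-1) + (0,)*4 + (1,)
def scoreWeights : List Int :=
  [1, -1] ++ List.replicate 13 0 ++ [-1, 0, -1, 0, -1] ++ List.replicate 4 0 ++ [1]

def score_sequence_alt (seq : String) : Int :=
  -- for i, c in enumerate(seq.upper()[:25]): score += _WEIGHTS[i] * ((c in 'HKR') - (c in 'DE'))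
  let t := PySem.List.slice (PySem.Str.upper seq).toList none (some 25)
  (PySem.List.enumerate t 0).foldl
    (fun score p =>
      score + PySem.List.pyGetD scoreWeights p.1 0 *
        ((if PySem.Chars.isIn [p.2] ['H', 'K', 'R'] then (1 : Int) else 0) -
         (if PySem.Chars.isIn [p.2] ['D', 'E'] then (1 : Int) else 0))) 0

-- ===== PRECONDITION & SPEC =====
def Spec_score_sequence (seq : String) (out : Int) : Prop := out = score_sequence_alt seq
instance (seq : String) (out : Int) : Decidable (Spec_score_sequence seq out) := by unfold Spec_score_sequence; infer_instance

-- ===== CLAIM (what is proved, stated in full; the proofs are below) =====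
def Claim_equal_score_sequence : Prop := ∀ (seq : String), Dom_score_sequence seq → Spec_score_sequence seq (score_sequence seq)

-- ===== LEMMAS AND PROOFS =====

-- the letter charge ((c in 'HKR') - (c in 'DE')) in propositional form
def chi (c : Char) : Int :=
  (if c = 'H' ∨ c = 'K' ∨ c = 'R' then 1 else 0) - (if c = 'D' ∨ c = 'E' then 1 else 0)

lemma chiB_eq (c : Char) :
    ((if PySem.Chars.isIn [c] ['H', 'K', 'R'] then (1 : Int) else 0) -
     (if PySem.Chars.isIn [c] ['D', 'E'] then (1 : Int) else 0)) = chi c := by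
  simp [chi, PySem.Chars.isIn_iff_infix, List.singleton_infix_iff]

-- B's fold over enumerate as an indexed Finset sum
lemma foldB (t : List Char) : ∀ (s : Nat) (a : Int),
    (PySem.List.enumerate t (s : Int)).foldl
      (fun score p =>
        score + PySem.List.pyGetD scoreWeights p.1 0 *
          ((if PySem.Chars.isIn [p.2] ['H', 'K', 'R'] then (1 : Int) else 0) -
           (if PySem.Chars.isIn [p.2] ['D', 'E'] then (1 : Int) else 0))) a
    = a + ∑ k ∈ Finset.range t.length, scoreWeights.getD (s + k) 0 * chi (t.getD k 'A') := by
  induction t with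
  | nil => intro s a; simp [PySem.List.enumerate]
  | cons c cs ih =>
      intro s a
      rw [PySem.List.enumerate_cons, List.foldl_cons]
      rw [show (s : Int) + 1 = ((s + 1 : Nat) : Int) by push_cast; ring]
      rw [ih (s+1)]
      simp only [List.length_cons]
      rw [Finset.sum_range_succ']
      simp only [List.getD_cons_zero, List.getD_cons_succ, PySem.List.pyGetD_natCast, chiB_eq]
      have : ∀ k, s + 1 + k = s + (k + 1) := by omega
      simp only [this]
      simp [List.getD]
      ring

lemma foldB0 (t : List Char) (a : Int) :
    (PySem.List.enumerate t 0).foldl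
      (fun score p =>
        score + PySem.List.pyGetD scoreWeights p.1 0 *
          ((if PySem.Chars.isIn [p.2] ['H', 'K', 'R'] then (1 : Int) else 0) -
           (if PySem.Chars.isIn [p.2] ['D', 'E'] then (1 : Int) else 0))) a
    = a + ∑ k ∈ Finset.range t.length, scoreWeights.getD (0 + k) 0 * chi (t.getD k 'A') :=
  foldB t 0 a

-- turn the take-25 sum into 25 guarded terms over the full list
lemma sum_take (l : List Char) :
    (∑ k ∈ Finset.range (l.take 25).length, scoreWeights.getD (0 + k) 0 * chi ((l.take 25).getD k 'A'))
    = ∑ k ∈ Finset.range 25, (if k < l.length then scoreWeights.getD k 0 * chi (l.getD k 'A') else 0) := by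
  rw [List.length_take]
  have h1 : (∑ k ∈ Finset.range (min 25 l.length), scoreWeights.getD (0 + k) 0 * chi ((l.take 25).getD k 'A'))
      = ∑ k ∈ Finset.range (min 25 l.length), (if k < l.length then scoreWeights.getD k 0 * chi (l.getD k 'A') else 0) := by
    apply Finset.sum_congr rfl
    intro k hk
    rw [Finset.mem_range, Nat.lt_min] at hk
    rw [if_pos hk.2, List.getD_eq_getElem?_getD, List.getD_eq_getElem?_getD,
        List.getElem?_take_of_lt hk.1, zero_add, ← List.getD_eq_getElem?_getD, ← List.getD_eq_getElem?_getD]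
  rw [h1]
  apply Finset.sum_subset (by intro x hx; rw [Finset.mem_range] at *; omega)
  intro x hx hnx
  rw [Finset.mem_range] at hx
  rw [Finset.mem_range] at hnx
  rw [if_neg (by omega)]

lemma posBranch (a : Int) (c : Char) :
    (if (PySem.Set.ofList ['H','K','R'] : PySem.Set Char).contains c then a + 1
     else if (PySem.Set.ofList ['D','E'] : PySem.Set Char).contains c then a - 1
     else a) = a + chi c := by
  simp only [PySem.Set.contains]
  by_cases h1 : c = 'H' <;> by_cases h2 : c = 'K' <;> by_cases h3 : c = 'R' <;>
    by_cases h4 : c = 'D' <;> by_cases h5 : c = 'E' <;>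
    simp_all [chi, PySem.Set.ofList] <;> ring

lemma negBranch (a : Int) (c : Char) :
    (if (PySem.Set.ofList ['H','K','R'] : PySem.Set Char).contains c then a - 1
     else if (PySem.Set.ofList ['D','E'] : PySem.Set Char).contains c then a + 1
     else a) = a - chi c := by
  simp only [PySem.Set.contains]
  by_cases h1 : c = 'H' <;> by_cases h2 : c = 'K' <;> by_cases h3 : c = 'R' <;>
    by_cases h4 : c = 'D' <;> by_cases h5 : c = 'E' <;>
    simp_all [chi, PySem.Set.ofList]

lemma Astep_pos (l : List Char) (i : Int) (hi : 0 ≤ i) (a : Int) :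
    (if 0 ≤ i ∧ i < (l.length : Int) then
       if (PySem.Set.ofList ['H','K','R'] : PySem.Set Char).contains (PySem.List.pyGetD l i ' ') then a + 1
       else if (PySem.Set.ofList ['D','E'] : PySem.Set Char).contains (PySem.List.pyGetD l i ' ') then a - 1
       else a
     else a) = a + (if i.toNat < l.length then chi (l.getD i.toNat 'A') else 0) := by
  by_cases h : i.toNat < l.length
  · rw [if_pos ⟨hi, by omega⟩, if_pos h]
    rw [PySem.List.pyGetD_eq_getElem _ _ hi (by omega), posBranch, List.getD_eq_getElem _ _ h]
  · rw [if_neg (by omega), if_neg h, add_zero]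

lemma Astep_neg (l : List Char) (i : Int) (hi : 0 ≤ i) (a : Int) :
    (if 0 ≤ i ∧ i < (l.length : Int) then
       if (PySem.Set.ofList ['H','K','R'] : PySem.Set Char).contains (PySem.List.pyGetD l i ' ') then a - 1
       else if (PySem.Set.ofList ['D','E'] : PySem.Set Char).contains (PySem.List.pyGetD l i ' ') then a + 1
       else a
     else a) = a - (if i.toNat < l.length then chi (l.getD i.toNat 'A') else 0) := by
  by_cases h : i.toNat < l.length
  · rw [if_pos ⟨hi, by omega⟩, if_pos h]
    rw [PySem.List.pyGetD_eq_getElem _ _ hi (by omega), negBranch, List.getD_eq_getElem _ _ h]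
  · rw [if_neg (by omega), if_neg h, sub_zero]

lemma posBranch0 (c : Char) :
    (if (PySem.Set.ofList ['H','K','R'] : PySem.Set Char).contains c then (1:Int)
     else if (PySem.Set.ofList ['D','E'] : PySem.Set Char).contains c then 0 - 1
     else 0) = chi c := by
  simpa using posBranch 0 c

lemma Astep_pos0 (l : List Char) :
    (if 0 ≤ (0:Int) ∧ (0:Int) < (l.length : Int) then
       if (PySem.Set.ofList ['H','K','R'] : PySem.Set Char).contains (PySem.List.pyGetD l 0 ' ') then (1:Int)
       else if (PySem.Set.ofList ['D','E'] : PySem.Set Char).contains (PySem.List.pyGetD l 0 ' ') then 0 - 1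
       else 0
     else 0) = (if (0:Int).toNat < l.length then chi (l.getD (0:Int).toNat 'A') else 0) := by
  by_cases h : (0:Int).toNat < l.length
  · have hc : (0:Int) < (l.length : Int) := by omega
    rw [if_pos ⟨le_refl 0, hc⟩, if_pos h,
        PySem.List.pyGetD_eq_getElem _ _ (le_refl 0) hc, posBranch0, List.getD_eq_getElem _ _ h]
  · rw [if_neg (by omega), if_neg h]

set_option maxHeartbeats 1000000 in
lemma main_eq (seq : String) : score_sequence seq = score_sequence_alt seq := by
  unfold score_sequence score_sequence_alt
  simp only [PySem.Str.len_eq, List.foldl_cons, List.foldl_nil,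
             PySem.List.slice_to _ (by norm_num : (0:Int) ≤ 25)]
  generalize (PySem.Str.upper seq).toList = l
  rw [show (25:Int).toNat = 25 from rfl]
  rw [foldB0, sum_take, zero_add]
  rw [Astep_neg l 19 (by norm_num), Astep_neg l 17 (by norm_num),
      Astep_neg l 15 (by norm_num), Astep_neg l 1 (by norm_num),
      Astep_pos l 24 (by norm_num), Astep_pos0 l]
  simp only [show Int.toNat 0 = 0 from rfl, show Int.toNat 1 = 1 from rfl,
             show Int.toNat 15 = 15 from rfl, show Int.toNat 17 = 17 from rfl,
             show Int.toNat 19 = 19 from rfl, show Int.toNat 24 = 24 from rfl]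
  simp only [Finset.sum_range_succ, Finset.sum_range_zero,
    show scoreWeights.getD 0 0 = 1 from by decide,
    show scoreWeights.getD 1 0 = -1 from by decide,
    show scoreWeights.getD 2 0 = 0 from by decide,
    show scoreWeights.getD 3 0 = 0 from by decide,
    show scoreWeights.getD 4 0 = 0 from by decide,
    show scoreWeights.getD 5 0 = 0 from by decide,
    show scoreWeights.getD 6 0 = 0 from by decide,
    show scoreWeights.getD 7 0 = 0 from by decide,
    show scoreWeights.getD 8 0 = 0 from by decide,
    show scoreWeights.getD 9 0 = 0 from by decide,
    show scoreWeights.getD 10 0 = 0 from by decide,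
    show scoreWeights.getD 11 0 = 0 from by decide,
    show scoreWeights.getD 12 0 = 0 from by decide,
    show scoreWeights.getD 13 0 = 0 from by decide,
    show scoreWeights.getD 14 0 = 0 from by decide,
    show scoreWeights.getD 16 0 = 0 from by decide,
    show scoreWeights.getD 18 0 = 0 from by decide,
    show scoreWeights.getD 20 0 = 0 from by decide,
    show scoreWeights.getD 21 0 = 0 from by decide,
    show scoreWeights.getD 22 0 = 0 from by decide,
    show scoreWeights.getD 23 0 = 0 from by decide,
    show scoreWeights.getD 15 0 = -1 from by decide,
    show scoreWeights.getD 17 0 = -1 from by decide,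
    show scoreWeights.getD 19 0 = -1 from by decide,
    show scoreWeights.getD 24 0 = 1 from by decide,
    zero_mul, ite_self, one_mul, neg_one_mul, add_zero, zero_add]
  split_ifs <;> ring

-- ===== VERDICT (by name: the statement is the Claim_ definition above) =====
theorem score_sequence_spec : Claim_equal_score_sequence := by
  intro seq _
  unfold Spec_score_sequence
  exact main_eq seq
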